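-- pv_equiv track=rewrite | github.com/4z0t/SCFA-python-patcher | Debug.py | get_log_path
-- ===== SOURCE A (Python) =====
-- def get_log_path(args: list[str]) -> str:
--     found = False
--     for arg in args:
--         if found:
--             return arg
--         if arg == "/log":
--             found = True
--             continue
--     return None
-- ===== SOURCE B (Python) =====
-- def get_log_path(args: list[str]) -> str:
--     if "/log" not in args:
--         return None
--     i = args.index("/log")
--     return args[i + 1] if i + 1 < len(args) else None
-- ===== Notes on version B (the rewrite author's own statement) =====
-- stated objective: idiomatic
-- what changed: Replaced the flag-carrying scan with locate-then-offset: find the first '/log' with index(), then return the element at i+1 under an explicit bounds check.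
import Mathlib
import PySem

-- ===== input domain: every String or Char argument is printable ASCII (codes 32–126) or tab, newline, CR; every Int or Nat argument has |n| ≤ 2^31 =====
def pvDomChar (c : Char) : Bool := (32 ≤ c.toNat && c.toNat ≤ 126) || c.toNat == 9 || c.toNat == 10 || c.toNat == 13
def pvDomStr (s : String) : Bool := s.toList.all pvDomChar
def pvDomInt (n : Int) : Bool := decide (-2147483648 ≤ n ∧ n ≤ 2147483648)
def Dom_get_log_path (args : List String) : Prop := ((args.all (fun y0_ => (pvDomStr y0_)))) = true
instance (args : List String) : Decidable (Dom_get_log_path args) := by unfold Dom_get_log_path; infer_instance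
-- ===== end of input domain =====

-- B replaces A's flag-carrying scan with locate-then-offset access (more idiomatic).


-- ===== PORT A =====
-- loop with the 'found' flag, transliterated as structural recursion on the list
def pvGoA : List String → Bool → Option String
  | [], _ => none
  | a :: rest, found =>
      if found then some a
      else if a == "/log" then pvGoA rest true
      else pvGoA rest false

def get_log_path (args : List String) : Option String := pvGoA args false

-- ===== PORT B =====
def get_log_path_alt (args : List String) : Option String :=
  if "/log" ∉ args then none
  else
    match PySem.List.index? args "/log" with
    | none => none
    | some i => if i + 1 < args.length then args[i + 1]? else none

-- ===== PRECONDITION & SPEC =====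
def Spec_get_log_path (args : List String) (out : Option String) : Prop := out = get_log_path_alt args
instance (args : List String) (out : Option String) : Decidable (Spec_get_log_path args out) := by unfold Spec_get_log_path; infer_instance

-- ===== CLAIM (what is proved, stated in full; the proofs are below) =====
def Claim_equal_get_log_path : Prop := ∀ (args : List String), Dom_get_log_path args → Spec_get_log_path args (get_log_path args)

-- ===== LEMMAS AND PROOFS =====
theorem pvGoA_true (rest : List String) : pvGoA rest true = rest[0]? := by
  cases rest <;> simp [pvGoA]

theorem pv_equal (args : List String) : pvGoA args false = get_log_path_alt args := by
  induction args with
  | nil => simp [pvGoA, get_log_path_alt]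
  | cons a rest ih =>
    by_cases ha : a = "/log"
    · subst ha
      unfold get_log_path_alt
      rw [PySem.List.index?_cons_self]
      simp only [pvGoA, beq_self_eq_true, if_true, pvGoA_true]
      cases rest <;> simp
    · have : (a == "/log") = false := by simp [ha]
      rw [pvGoA] -- unfold one step
      simp only [this, Bool.false_eq_true, if_false, ih]
      unfold get_log_path_alt
      by_cases hm : "/log" ∈ rest
      · have hm' : "/log" ∈ a :: rest := List.mem_cons_of_mem _ hm
        simp only [hm, hm', not_true_eq_false, if_false]
        rw [PySem.List.index?_cons_of_ne rest ha]
        obtain ⟨i, hi⟩ := Option.isSome_iff_exists.1 ((PySem.List.index?_isSome_iff rest "/log").2 hm)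
        rw [hi]
        simp only [Option.map_some]
        rcases PySem.List.getElem_of_index?_eq_some hi with ⟨hk, -, -⟩
        by_cases hb : i + 1 < rest.length
        · simp [hb]
        · simp [hb]
      · have hm' : "/log" ∉ a :: rest := by
          simp only [List.mem_cons, not_or]
          exact ⟨fun h => ha h.symm, hm⟩
        simp [hm, hm']

-- ===== VERDICT (by name: the statement is the Claim_ definition above) =====
theorem get_log_path_spec : Claim_equal_get_log_path := by
  intro args _
  unfold Spec_get_log_path get_log_path
  exact pv_equal args
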